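-- pv_equiv track=rewrite | github.com/wilmurillo-ai/Design-Assistant | .skills/openclaw-skills/skills/hanjing5024064/contract-guardian/scripts/risk_analyzer.py | _generate_risk_summary
-- ===== SOURCE A (Python) =====
-- from typing import Any, Dict, List
--
-- def _generate_risk_summary(risks: List[Dict[str, Any]]) -> str:
--     """生成风险摘要文本。"""
--     if not risks:
--         return "未发现明显风险条款，合同整体较为安全。"
--
--     high = [r for r in risks if r["severity"] == "high"]
--     medium = [r for r in risks if r["severity"] == "medium"]
--
--     parts = []
--     if high:
--         names = "、".join(r["category_name"] for r in high)
--         parts.append(f"发现 {len(high)} 项高风险条款（{names}），建议重点关注")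
--     if medium:
--         names = "、".join(r["category_name"] for r in medium)
--         parts.append(f"发现 {len(medium)} 项中等风险条款（{names}），建议审慎评估")
--
--     return "；".join(parts) + "。"
-- ===== SOURCE B (Python) =====
-- from typing import Any, Dict, List
--
-- _SUMMARY_CONFIG = [
--     ("high", "高风险", "建议重点关注"),
--     ("medium", "中等风险", "建议审慎评估"),
-- ]
--
-- def _generate_risk_summary(risks: List[Dict[str, Any]]) -> str:
--     """生成风险摘要文本。"""
--     if not risks:
--         return "未发现明显风险条款，合同整体较为安全。"
--
--     buckets: Dict[str, List[str]] = {}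
--     for r in risks:
--         sev = r["severity"]
--         if sev == "high" or sev == "medium":
--             buckets.setdefault(sev, []).append(r["category_name"])
--
--     parts = []
--     for sev, label, advice in _SUMMARY_CONFIG:
--         if sev in buckets:
--             names = buckets[sev]
--             parts.append(f"发现 {len(names)} 项{label}条款（{'、'.join(names)}），{advice}")
--
--     return "；".join(parts) + "。"
-- ===== Notes on version B (the rewrite author's own statement) =====
-- stated objective: alternative
-- what changed: Replaces A's two separate filter passes and two hand-written branch blocks by a single grouping pass building a severity->names dict plus one table-driven loop over (severity, label, advice) config rows; Pre_ excludes only inputs where A raises KeyError (missing 'severity', or missing 'category_name' on a high/medium item), where B raises too.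
import Mathlib
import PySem

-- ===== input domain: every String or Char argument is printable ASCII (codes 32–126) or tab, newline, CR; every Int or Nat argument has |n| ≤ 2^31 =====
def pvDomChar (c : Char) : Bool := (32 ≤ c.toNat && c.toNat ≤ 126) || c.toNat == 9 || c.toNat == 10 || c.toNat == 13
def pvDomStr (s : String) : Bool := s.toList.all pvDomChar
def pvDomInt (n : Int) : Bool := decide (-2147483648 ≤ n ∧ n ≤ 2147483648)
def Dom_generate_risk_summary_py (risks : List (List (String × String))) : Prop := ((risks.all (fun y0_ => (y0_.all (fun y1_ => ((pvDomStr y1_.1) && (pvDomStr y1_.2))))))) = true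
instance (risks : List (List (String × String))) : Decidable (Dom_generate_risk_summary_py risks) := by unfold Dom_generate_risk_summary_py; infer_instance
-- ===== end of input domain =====

-- B replaces A's two filter passes and two branch blocks by one grouping pass into a
-- severity->names dict plus a table-driven loop over (severity, label, advice) rows.

-- shared helpers: dict lookup (first match, Python assoc-dict), defaulted (Pre_ rules out the none = KeyError case)
def pvSev (r : List (String × String)) : String :=
  ((PySem.Dict.mk r).get? "severity").getD ""
def pvCat (r : List (String × String)) : String :=
  ((PySem.Dict.mk r).get? "category_name").getD ""

-- ===== PORT A =====
def generate_risk_summary_py (risks : List (List (String × String))) : String :=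
  if risks.isEmpty then "未发现明显风险条款，合同整体较为安全。"
  else
    let high := risks.filter (fun r => pvSev r == "high")
    let medium := risks.filter (fun r => pvSev r == "medium")
    let parts : List String := []
    let parts := if high.isEmpty then parts else
      parts ++ ["发现 " ++ PySem.Int.toStr (high.length : Int) ++ " 项高风险条款（" ++
        PySem.Str.join "、" (high.map pvCat) ++ "），建议重点关注"]
    let parts := if medium.isEmpty then parts else
      parts ++ ["发现 " ++ PySem.Int.toStr (medium.length : Int) ++ " 项中等风险条款（" ++
        PySem.Str.join "、" (medium.map pvCat) ++ "），建议审慎评估"]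
    PySem.Str.join "；" parts ++ "。"

-- ===== PORT B =====
def pvConfig : List (String × String × String) :=
  [("high", "高风险", "建议重点关注"), ("medium", "中等风险", "建议审慎评估")]

def generate_risk_summary_py_alt (risks : List (List (String × String))) : String :=
  if risks.isEmpty then "未发现明显风险条款，合同整体较为安全。"
  else
    let buckets := risks.foldl (fun d r =>
      let sev := pvSev r
      if sev == "high" || sev == "medium" then d.modify sev [] (· ++ [pvCat r]) else d)
      (PySem.Dict.empty : PySem.Dict String (List String))
    let parts := pvConfig.foldl (fun ps t =>
      if buckets.contains t.1 then
        let names := buckets.getD t.1 []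
        ps ++ ["发现 " ++ PySem.Int.toStr (names.length : Int) ++ " 项" ++ t.2.1 ++ "条款（" ++
          PySem.Str.join "、" names ++ "），" ++ t.2.2]
      else ps) ([] : List String)
    PySem.Str.join "；" parts ++ "。"

-- ===== PRECONDITION & SPEC =====
-- Pre_ excludes exactly the inputs where Python A raises KeyError: a risk without a
-- "severity" key, or a high/medium risk without a "category_name" key (B raises there too).
def Pre_generate_risk_summary_py (risks : List (List (String × String))) : Prop :=
  ∀ r ∈ risks, ((PySem.Dict.mk r).get? "severity").isSome ∧
    (pvSev r = "high" ∨ pvSev r = "medium" → ((PySem.Dict.mk r).get? "category_name").isSome)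
instance (risks : List (List (String × String))) : Decidable (Pre_generate_risk_summary_py risks) := by
  unfold Pre_generate_risk_summary_py; infer_instance
def pvWitness_generate_risk_summary_py : (List (List (String × String))) :=
  [[("severity", "high"), ("category_name", "penalty")],
   [("severity", "low")]]

def Spec_generate_risk_summary_py (risks : List (List (String × String))) (out : String) : Prop := out = generate_risk_summary_py_alt risks
instance (risks : List (List (String × String))) (out : String) : Decidable (Spec_generate_risk_summary_py risks out) := by unfold Spec_generate_risk_summary_py; infer_instance

-- ===== CLAIM (what is proved, stated in full; the proofs are below) =====
def Claim_equal_generate_risk_summary_py : Prop := ∀ (risks : List (List (String × String))), Dom_generate_risk_summary_py risks → Pre_generate_risk_summary_py risks → Spec_generate_risk_summary_py risks (generate_risk_summary_py risks)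

-- ===== LEMMAS AND PROOFS =====

-- the grouping fold used by B
def pvFold (risks : List (List (String × String))) (d : PySem.Dict String (List String)) :
    PySem.Dict String (List String) :=
  risks.foldl (fun d r =>
    let sev := pvSev r
    if sev == "high" || sev == "medium" then d.modify sev [] (· ++ [pvCat r]) else d) d

theorem pvFold_getD (risks : List (List (String × String))) (d : PySem.Dict String (List String))
    (k : String) (hk : k = "high" ∨ k = "medium") :
    (pvFold risks d).getD k [] =
      d.getD k [] ++ (risks.filter (fun r => pvSev r == k)).map pvCat := by
  induction risks generalizing d with
  | nil => simp [pvFold]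
  | cons r rest ih =>
    simp only [pvFold, List.foldl_cons] at *
    by_cases hg : (pvSev r == "high" || pvSev r == "medium") = true
    · simp only [hg, if_pos]
      rw [ih]
      by_cases hsk : pvSev r = k
      · simp [hsk, PySem.Dict.getD_modify_self]
      · have : (pvSev r == k) = false := by simp [hsk]
        simp [this, PySem.Dict.getD_modify, Ne.symm hsk]
    · have hs : (pvSev r == k) = false := by
        rcases hk with h | h <;> simp_all
      simp only [hg]
      rw [if_neg (by simp_all)]
      rw [ih]
      simp [hs]

theorem pvFold_contains (risks : List (List (String × String))) (d : PySem.Dict String (List String))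
    (k : String) (hk : k = "high" ∨ k = "medium") :
    (pvFold risks d).contains k =
      (d.contains k || !(risks.filter (fun r => pvSev r == k)).isEmpty) := by
  induction risks generalizing d with
  | nil => simp [pvFold]
  | cons r rest ih =>
    simp only [pvFold, List.foldl_cons] at *
    by_cases hg : (pvSev r == "high" || pvSev r == "medium") = true
    · simp only [hg, if_pos]
      rw [ih]
      by_cases hsk : pvSev r = k
      · simp [hsk, PySem.Dict.contains_modify]
      · have : (pvSev r == k) = false := by simp [hsk]
        have h2 : (k == pvSev r) = false := by simp [Ne.symm hsk]
        simp [this, h2, PySem.Dict.contains_modify]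
    · have hs : (pvSev r == k) = false := by
        rcases hk with h | h <;> simp_all
      simp only [hg]
      rw [if_neg (by simp_all)]
      rw [ih]
      simp [hs]

-- string reassociation for the two part formats (A writes one literal, B splices label/advice)
theorem pvStrHigh (n j : String) :
    "发现 " ++ n ++ " 项" ++ "高风险" ++ "条款（" ++ j ++ "），" ++ "建议重点关注" =
    "发现 " ++ n ++ " 项高风险条款（" ++ j ++ "），建议重点关注" := by
  apply String.ext
  simp

theorem pvStrMed (n j : String) :
    "发现 " ++ n ++ " 项" ++ "中等风险" ++ "条款（" ++ j ++ "），" ++ "建议审慎评估" =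
    "发现 " ++ n ++ " 项中等风险条款（" ++ j ++ "），建议审慎评估" := by
  apply String.ext
  simp

-- ===== VERDICT (by name: the statement is the Claim_ definition above) =====
theorem generate_risk_summary_py_spec : Claim_equal_generate_risk_summary_py := by
  intro risks _ _
  unfold Spec_generate_risk_summary_py
  unfold generate_risk_summary_py generate_risk_summary_py_alt
  by_cases h : risks.isEmpty
  · simp [h]
  · simp only [h, if_neg, Bool.false_eq_true, not_false_eq_true]
    have hget := pvFold_getD risks PySem.Dict.empty
    have hcon := pvFold_contains risks PySem.Dict.empty
    simp only [pvFold] at hget hcon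
    simp only [pvConfig, List.foldl_cons, List.foldl_nil]
    rw [hcon "high" (Or.inl rfl), hcon "medium" (Or.inr rfl),
        hget "high" (Or.inl rfl), hget "medium" (Or.inr rfl)]
    simp only [PySem.Dict.contains_empty, PySem.Dict.getD_empty, Bool.false_or, List.nil_append]
    by_cases hh : (risks.filter (fun r => pvSev r == "high")).isEmpty <;>
      by_cases hm : (risks.filter (fun r => pvSev r == "medium")).isEmpty <;>
        simp [hh, hm, List.length_map, pvStrHigh, pvStrMed]
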